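-- pv_equiv track=rewrite | github.com/Gryfit/Python-AGH | lab3/tonia_bartłomiej.py | makeTruthTable
-- ===== SOURCE A (Python) =====
-- import string
--
-- def evaluate(w, vec): #ewaluacja wyrazenia taka jak na zajeciach, dostaje wyrazenie i wektor 01011...
--     operators = {
--         '^': lambda x, y: int(bool(x) ^ bool(y)),
--         '&': lambda x, y: int(bool(x) and bool(y)),
--         '|': lambda x, y: int(bool(x) or bool(y)),
--         '/': lambda x, y: int(not(bool(x) and bool(y))),
--         '>': lambda x, y: int(not bool(x) or bool(y))
--     }
--     var = "".join(sorted(set(w) & set(string.ascii_lowercase)))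
--     l = list(w)
--     for i in range(len(l)):
--         p = var.find(l[i])
--         if p >= 0: l[i] = vec[p]
--     for i in range(0, len(l)):
--         if l[i] == "T":
--             l[i] = "1"
--         if l[i] == "F":
--             l[i] = "0"
--     w = "".join(l)
--     st = []
--     for z in w:
--         if z in "01": st.append(int(z))
--         if z in operators:
--             st.append(operators[z](st.pop(), st.pop()))
--         if z == "~":
--             st.append(int(not st.pop()))
--     return st[0]
--
-- def ones(str):
--     cc =0
--     for c in str:
--         if c == '1':
--             cc+=1
--     return cc
--
-- def makeTruthTable (exp): #tworzy liste dla ktorej wyrazenie jest prawda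
--     var = "".join(sorted(set(exp) & set(string.ascii_lowercase)))
--     masks  = [str(bin(i)[2:].zfill(len(var))) for i in range(0, 2**len(var), 1)]
--     masks = sorted(masks,key=lambda x: ones(x))
--     vec = []
--     for m in masks:
--         if evaluate(exp, m) == 1:
--             vec.append(m)
--     return vec
-- ===== SOURCE B (Python) =====
-- import string
--
-- def makeTruthTable(exp):
--     # Symbolic bitset evaluation: instead of running the stack machine once per
--     # mask, run it ONCE over the expression with each stack element being the
--     # whole 2^n-entry truth-table column packed into an int (bit i = value
--     # under mask i); then list the satisfying masks bucketed by popcount.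
--     vars_ = sorted({c for c in exp if c in string.ascii_lowercase})
--     n = len(vars_)
--     size = 1 << n
--     full = (1 << size) - 1
--     cols = {}
--     for p, v in enumerate(vars_):
--         b = n - 1 - p
--         col = 0
--         for i in range(size):
--             col |= ((i >> b) & 1) << i
--         cols[v] = col
--     st = []
--     for c in exp:
--         if c in cols:
--             st.append(cols[c])
--         elif c in '1T':
--             st.append(full)
--         elif c in '0F':
--             st.append(0)
--         elif c in '^&|/>':
--             x = st.pop()
--             y = st.pop()
--             if c == '^':
--                 st.append(x ^ y)
--             elif c == '&':
--                 st.append(x & y)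
--             elif c == '|':
--                 st.append(x | y)
--             elif c == '/':
--                 st.append(full ^ (x & y))
--             else:
--                 st.append((full ^ x) | y)
--         elif c == '~':
--             st.append(full ^ st.pop())
--     S = st[0]
--     buckets = [[] for _ in range(n + 1)]
--     for i in range(size):
--         if (S >> i) & 1:
--             m = format(i, 'b').zfill(n)
--             buckets[m.count('1')].append(m)
--     return [m for b in buckets for m in b]
-- ===== Notes on version B (the rewrite author's own statement) =====
-- stated objective: faster
-- what changed: B never evaluates the expression per assignment: it packs each variable's whole 2^n-entry truth-table column into an integer bitset, runs the RPN stack machine ONCE over the expression with bitwise &,|,^ on whole columns, and then reads the satisfying masks off the bits of the single result integer, bucketing them by popcount to reproduce A's stable sort-by-ones order; A instead builds all mask strings, comparison-sorts them, and re-runs the stack machine (plus a full substitution pass over the expression) once per mask.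
-- outside the precondition, e.g. on makeTruthTable('~'): A raises IndexError, B raises IndexError
import Mathlib
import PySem

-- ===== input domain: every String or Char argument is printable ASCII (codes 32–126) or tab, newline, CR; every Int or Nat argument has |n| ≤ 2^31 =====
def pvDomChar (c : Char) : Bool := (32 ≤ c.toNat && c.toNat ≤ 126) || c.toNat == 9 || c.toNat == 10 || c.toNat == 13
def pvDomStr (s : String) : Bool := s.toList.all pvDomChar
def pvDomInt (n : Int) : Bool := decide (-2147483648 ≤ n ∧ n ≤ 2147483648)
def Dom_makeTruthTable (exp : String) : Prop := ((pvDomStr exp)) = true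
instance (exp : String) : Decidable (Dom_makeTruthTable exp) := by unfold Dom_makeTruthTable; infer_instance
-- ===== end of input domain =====

-- B evaluates the RPN expression ONCE, with every stack element the whole 2^n-entry
-- truth-table column packed into an integer bitset, instead of A's per-mask stack
-- evaluation of a substituted copy of the expression plus a comparison sort of the
-- masks by number of ones (objective: faster).

-- string.ascii_lowercase (module constant used by both programs)
def pvLower : List Char := "abcdefghijklmnopqrstuvwxyz".toList

-- ===== PORT A =====

-- operators[z](x, y): dict of lambdas, looked up by key; ported as a branch per key
def pvApplyA (z : Char) (x y : Int) : Int :=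
  let bx := decide (x ≠ 0)   -- bool(x)
  let bY := decide (y ≠ 0)
  if z = '^' then (if bx != bY then 1 else 0)
  else if z = '&' then (if bx && bY then 1 else 0)
  else if z = '|' then (if bx || bY then 1 else 0)
  else if z = '/' then (if !(bx && bY) then 1 else 0)
  else (if !bx || bY then 1 else 0)

-- "".join(sorted(set(w) & set(string.ascii_lowercase)))
def pvVarsA (w : List Char) : List Char :=
  PySem.List.sorted (PySem.Set.inter (PySem.Set.ofList w) (PySem.Set.ofList pvLower)) (fun c => c) false

-- first for-loop of evaluate: p = var.find(l[i]); if p >= 0: l[i] = vec[p]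
-- (each index is rewritten once from its old value, so the loop is a per-element map;
--  vec[p] uses the total pyGetD form: at every call p = var.find(c) < len(var) ≤ len(vec))
def pvSub1A (var vec : List Char) (c : Char) : Char :=
  let p := PySem.Chars.find var [c]
  if p ≥ 0 then PySem.List.pyGetD vec p c else c

-- second for-loop of evaluate: "T" -> "1", "F" -> "0"
def pvSub2A (c : Char) : Char := if c = 'T' then '1' else if c = 'F' then '0' else c

-- stack loop body of evaluate; the stack is kept top-first (Python appends/pops at the
-- end, so Python's st[0] is the LAST element here); the three Python `if`s touch disjoint
-- character sets, so they are ported as one chain; none = IndexError (pop from empty list)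
def pvStepA (st : Option (List Int)) (z : Char) : Option (List Int) :=
  match st with
  | none => none
  | some st =>
    if z ∈ (['0', '1'] : List Char) then some (((z.toNat : Int) - 48) :: st)  -- int(z)
    else if z ∈ (['^', '&', '|', '/', '>'] : List Char) then
      match st with
      | x :: y :: rest => some (pvApplyA z x y :: rest)
      | _ => none
    else if z = '~' then
      match st with
      | x :: rest => some ((if x ≠ 0 then (0 : Int) else 1) :: rest)  -- int(not bool(x))
      | [] => none
    else some st

-- evaluate(w, vec); none exactly where the Python raises (empty pop / st[0] of empty)
def pvEvalA (w vec : List Char) : Option Int :=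
  let var := pvVarsA w
  let l2 := (w.map (pvSub1A var vec)).map pvSub2A
  (l2.foldl pvStepA (some [])).bind List.getLast?    -- st[0] = bottom of the stack

-- ones(str)
def pvOnesA (s : List Char) : Int := s.foldl (fun cc c => if c = '1' then cc + 1 else cc) 0

def makeTruthTable (exp : String) : List String :=
  let var := pvVarsA exp.toList
  -- [str(bin(i)[2:].zfill(len(var))) for i in range(0, 2**len(var), 1)]
  let masks := (PySem.List.pyRange 0 ((2 : Int) ^ var.length) 1).map (fun i =>
      PySem.Chars.zfill (PySem.List.slice (PySem.Int.toBinChars0b i) (some 2) none) (var.length : Int))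
  let sortedMasks := PySem.List.sorted masks pvOnesA false   -- sorted(masks, key=ones)
  let vec := sortedMasks.foldl
      (fun acc m => if pvEvalA exp.toList m = some 1 then acc ++ [m] else acc) []
  vec.map String.ofList

-- ===== PORT B =====

-- sorted({c for c in exp if c in string.ascii_lowercase})
def pvVarsB (w : List Char) : List Char :=
  PySem.List.sorted (PySem.Set.ofList (w.filter (fun c => PySem.Chars.isIn [c] pvLower)))
    (fun c => c) false

-- inner column loop for the variable of index p: every Python int in B is a
-- NONNEGATIVE bitset, so its |, &, <<, >> are ported over Nat (Python-exact there)
def pvColB (n p : Nat) : Nat :=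
  (PySem.List.pyRange 0 ((2 : Int) ^ n) 1).foldl
    (fun col i => col ||| (((i.toNat >>> (n - 1 - p)) &&& 1) <<< i.toNat)) 0

-- cols = {} filled by the 'for p, v in enumerate(vars_)' loop
def pvColsB (vars : List Char) : PySem.Dict Char Nat :=
  (PySem.List.enumerate vars 0).foldl
    (fun d pv => PySem.Dict.insert d pv.2 (pvColB vars.length pv.1.toNat)) PySem.Dict.empty

-- the operator branch bodies of B's stack loop (x = first pop = top)
def pvOpB (full : Nat) (c : Char) (x y : Nat) : Nat :=
  if c = '^' then x ^^^ y
  else if c = '&' then x &&& y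
  else if c = '|' then x ||| y
  else if c = '/' then full ^^^ (x &&& y)
  else (full ^^^ x) ||| y

-- one character of B's single stack pass; stack top-first; none = IndexError
def pvStepB (cols : PySem.Dict Char Nat) (full : Nat) (st : Option (List Nat)) (c : Char) :
    Option (List Nat) :=
  match st with
  | none => none
  | some st =>
    match PySem.Dict.get? cols c with
    | some col => some (col :: st)   -- if c in cols: st.append(cols[c])
    | none =>
      if c ∈ (['1', 'T'] : List Char) then some (full :: st)
      else if c ∈ (['0', 'F'] : List Char) then some (0 :: st)
      else if c ∈ (['^', '&', '|', '/', '>'] : List Char) then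
        match st with
        | x :: y :: rest => some (pvOpB full c x y :: rest)
        | _ => none
      else if c = '~' then
        match st with
        | x :: rest => some ((full ^^^ x) :: rest)
        | [] => none
      else some st

def makeTruthTable_alt (exp : String) : List String :=
  let vars := pvVarsB exp.toList
  let n := vars.length
  let size := 2 ^ n                -- size = 1 << n
  let full := 2 ^ size - 1         -- full = (1 << size) - 1
  let cols := pvColsB vars
  -- S = st[0] after the single pass; none = IndexError (outside Pre_)
  match (exp.toList.foldl (pvStepB cols full) (some [])).bind List.getLast? with
  | none => []
  | some S =>
    let buckets0 : List (List (List Char)) := List.replicate (n + 1) []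
    let final := (PySem.List.pyRange 0 ((2 : Int) ^ n) 1).foldl (fun bs i =>
      if (S >>> i.toNat) &&& 1 ≠ 0 then            -- if (S >> i) & 1:
        let m := PySem.Chars.zfill (PySem.Int.toBinChars i) (n : Int)  -- format(i,'b').zfill(n)
        PySem.List.pySetD bs ((PySem.Chars.count m ['1'] : Nat) : Int)
          (PySem.List.pyGetD bs ((PySem.Chars.count m ['1'] : Nat) : Int) [] ++ [m])
      else bs) buckets0
    (final.foldl (fun acc b => acc ++ b) []).map String.ofList

-- ===== PRECONDITION & SPEC =====

-- stack effect of one character (operands push 1, binary operators pop 2 push 1)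
def pvDeltaP (c : Char) : Int :=
  if c ∈ pvLower ∨ c ∈ (['0', '1', 'T', 'F'] : List Char) then 1
  else if c ∈ (['^', '&', '|', '/', '>'] : List Char) then -1 else 0

def pvBal (cs : List Char) : Int := (cs.map pvDeltaP).sum

-- Exactly the inputs on which A returns: the RPN expression is well formed — every binary
-- operator sees at least two operands on the stack, every '~' at least one, and the final
-- stack is nonempty (otherwise Python A raises IndexError; the stack height before the k-th
-- character is the balance of the first k characters, independent of the mask).
def Pre_makeTruthTable (exp : String) : Prop :=
  (∀ k : Nat, k < exp.toList.length →
    ((exp.toList.getD k ' ') ∈ (['^', '&', '|', '/', '>'] : List Char) →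
        2 ≤ pvBal (exp.toList.take k)) ∧
    ((exp.toList.getD k ' ') = '~' → 1 ≤ pvBal (exp.toList.take k))) ∧
  1 ≤ pvBal exp.toList

instance (exp : String) : Decidable (Pre_makeTruthTable exp) := by
  unfold Pre_makeTruthTable; infer_instance

def pvWitness_makeTruthTable : String := "ab^"

def Spec_makeTruthTable (exp : String) (out : List String) : Prop := out = makeTruthTable_alt exp
instance (exp : String) (out : List String) : Decidable (Spec_makeTruthTable exp out) := by
  unfold Spec_makeTruthTable; infer_instance

-- ===== CLAIM (what is proved, stated in full; the proofs are below) =====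
def Claim_equal_makeTruthTable : Prop := ∀ (exp : String), Dom_makeTruthTable exp → Pre_makeTruthTable exp → Spec_makeTruthTable exp (makeTruthTable exp)

-- ===== LEMMAS AND PROOFS =====

-- A's stack entries, as the bit i of B's column bitsets
def pvBit (i : Nat) (x : Nat) : Int := if x.testBit i then 1 else 0

-- ---- A's and B's variable lists are the same list ----

theorem pvFilter_ofList {p : Char → Bool} (w : List Char) :
    (PySem.Set.ofList w).filter p = PySem.Set.ofList (w.filter p) := by
  induction w using List.reverseRecOn with
  | nil => rfl
  | append_singleton w x ih =>
    have hof : ∀ (l : List Char), PySem.Set.ofList (l ++ [x])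
        = PySem.Set.add (PySem.Set.ofList l) x := by
      intro l; simp [PySem.Set.ofList, List.foldl_append]
    rw [hof, List.filter_append]
    by_cases hmem : x ∈ PySem.Set.ofList w
    · have h1 : (PySem.Set.ofList w).contains x = true := by simpa using hmem
      have h2 : x ∈ w := (PySem.Set.mem_ofList _ _).mp hmem
      simp only [PySem.Set.add, h1, if_true]
      by_cases hpx : p x = true
      · have h3 : x ∈ w.filter p := List.mem_filter.mpr ⟨h2, hpx⟩
        rw [List.filter_cons, if_pos hpx]
        rw [List.filter_nil, hof]
        simp only [PySem.Set.add]
        rw [if_pos (by simpa using (PySem.Set.mem_ofList _ _).mpr h3)]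
        exact ih
      · rw [List.filter_cons, if_neg hpx, List.filter_nil, List.append_nil]
        exact ih
    · have h1 : (PySem.Set.ofList w).contains x = false := by
        simpa using hmem
      simp only [PySem.Set.add, h1, Bool.false_eq_true, if_false]
      by_cases hpx : p x = true
      · have h3 : x ∉ PySem.Set.ofList (w.filter p) := by
          rw [PySem.Set.mem_ofList]
          intro hx
          exact hmem ((PySem.Set.mem_ofList _ _).mpr (List.mem_filter.mp hx).1)
        rw [List.filter_append, List.filter_cons, if_pos hpx, List.filter_nil,
          hof]
        simp only [PySem.Set.add]
        rw [if_neg (by simpa using h3)]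
        rw [ih]
      · rw [List.filter_append, List.filter_cons, if_neg hpx, List.filter_nil]
        simpa using ih

theorem pvVars_eq (w : List Char) : pvVarsA w = pvVarsB w := by
  unfold pvVarsA pvVarsB
  congr 1
  rw [show PySem.Set.inter (PySem.Set.ofList w) (PySem.Set.ofList pvLower)
      = (PySem.Set.ofList w).filter (fun x => (PySem.Set.ofList pvLower).contains x) from rfl]
  rw [pvFilter_ofList]
  congr 1
  apply List.filter_congr
  intro c _
  by_cases hm : c ∈ pvLower
  · have a1 : (PySem.Set.ofList pvLower).contains c = true := by
      simpa using (PySem.Set.mem_ofList pvLower c).mpr hm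
    have a2 : PySem.Chars.isIn [c] pvLower = true :=
      (PySem.Chars.isIn_iff_infix _ _).mpr ((List.singleton_infix_iff _ _).mpr hm)
    rw [a1, a2]
  · have a1 : (PySem.Set.ofList pvLower).contains c = false := by
      simpa using fun hx => hm ((PySem.Set.mem_ofList pvLower c).mp hx)
    have a2 : PySem.Chars.isIn [c] pvLower = false := by
      rw [PySem.Chars.isIn_eq_false_iff]
      intro hx
      exact hm ((List.singleton_infix_iff _ _).mp hx)
    rw [a1, a2]

theorem pvVarsA_nodup (w : List Char) : (pvVarsA w).Nodup := by
  have h : (PySem.Set.inter (PySem.Set.ofList w) (PySem.Set.ofList pvLower)).Nodup := by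
    unfold PySem.Set.inter
    exact (PySem.Set.nodup_ofList w).filter _
  exact ((PySem.List.sorted_perm _ (fun c : Char => c) false).symm.nodup h)

-- ---- var.find on a single character is the first index, as an association-list lookup ----

theorem pvIndex?_lt (l : List Char) (c : Char) (k : Nat)
    (h : PySem.List.index? l c = some k) : k < l.length := by
  rw [PySem.List.index?_eq_some_iff] at h
  obtain ⟨pre, suf, rfl, rfl, -⟩ := h
  simp

theorem pvFind_single (l : List Char) (c : Char) :
    PySem.Chars.find l [c] =
      (match PySem.List.index? l c with | some k => (k : Int) | none => -1) := by
  by_cases hc : c ∈ l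
  · have h0 : 0 ≤ PySem.Chars.find l [c] := by
      rw [PySem.Chars.find_nonneg_iff, List.singleton_infix_iff]; exact hc
    obtain ⟨hpre, hmin⟩ := PySem.Chars.find_spec h0
    set k := (PySem.Chars.find l [c]).toNat with hk
    obtain ⟨t, ht⟩ := hpre
    simp only [List.singleton_append] at ht
    have hklen : k < l.length := by
      by_contra hge
      rw [List.drop_eq_nil_of_le (by omega)] at ht
      exact List.cons_ne_nil _ _ ht
    have hidx : PySem.List.index? l c = some k := by
      rw [PySem.List.index?_eq_some_iff]
      refine ⟨l.take k, t, ?_, by simp [List.length_take]; omega, ?_⟩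
      · conv_lhs => rw [← List.take_append_drop k l, ← ht]
      · intro hmem
        obtain ⟨i, hi, hgi⟩ := List.getElem_of_mem hmem
        have hik : i < k := by have := hi; simp [List.length_take] at this; omega
        have hilen : i < l.length := by omega
        apply hmin i hik
        refine ⟨l.drop (i + 1), ?_⟩
        rw [List.singleton_append]
        rw [List.getElem_take] at hgi
        rw [← hgi]
        exact (List.drop_eq_getElem_cons hilen).symm
    rw [hidx]
    simp [hk, Int.toNat_of_nonneg h0]
  · have h1 : PySem.Chars.find l [c] = -1 := by
      rw [PySem.Chars.find_eq_neg_one_iff, List.singleton_infix_iff]; exact hc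
    rw [h1, (PySem.List.index?_eq_none_iff l c).mpr hc]

-- ---- the cols dict: items and lookup ----

theorem pvUpdate_empty {ν : Type} (ps : List (Char × ν)) (h : (ps.map Prod.fst).Nodup) :
    (PySem.Dict.update PySem.Dict.empty ps).items = ps := by
  induction ps using List.reverseRecOn with
  | nil => rfl
  | append_singleton ps p ih =>
    rw [List.map_append, List.nodup_append] at h
    obtain ⟨hnd, -, hdisj⟩ := h
    have hnotin : p.1 ∉ ps.map Prod.fst := by
      intro hmem; exact hdisj p.1 hmem p.1 (by simp) rfl
    have hcon : (PySem.Dict.update PySem.Dict.empty ps).contains p.1 = false := by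
      simp only [PySem.Dict.contains, ih hnd]
      rw [List.any_eq_false]
      intro q hq
      simp only [beq_iff_eq]
      intro hqe; exact hnotin (hqe ▸ List.mem_map_of_mem hq)
    simp only [PySem.Dict.update, List.foldl_append, List.foldl_cons, List.foldl_nil]
    rw [show List.foldl (fun acc p => acc.insert p.1 p.2) PySem.Dict.empty ps
        = PySem.Dict.update PySem.Dict.empty ps from rfl]
    simp only [PySem.Dict.insert, hcon]
    simp [ih hnd]

theorem pvEnumFind (vs : List Char) (c : Char) (N : Nat) : ∀ (s : Nat),
    List.find? (fun q => q.1 == c)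
        ((PySem.List.enumerate vs (s : Int)).map (fun pv => (pv.2, pvColB N pv.1.toNat)))
      = (PySem.List.index? vs c).map (fun k => (c, pvColB N (s + k))) := by
  induction vs with
  | nil => intro s; simp [PySem.List.enumerate_nil, PySem.List.index?]
  | cons v vs ih =>
    intro s
    rw [PySem.List.enumerate_cons]
    by_cases hvc : v = c
    · subst hvc
      rw [PySem.List.index?_cons_self]
      simp
    · rw [PySem.List.index?_cons_of_ne _ hvc]
      simp only [List.map_cons]
      rw [List.find?_cons_of_neg (by simp [hvc])]
      rw [show ((s : Int) + 1) = ((s + 1 : Nat) : Int) by push_cast; ring]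
      rw [ih (s + 1)]
      cases PySem.List.index? vs c with
      | none => rfl
      | some k => simp [Nat.add_comm, Nat.add_left_comm]

theorem pvColsB_get? (vars : List Char) (c : Char) (hnd : vars.Nodup) :
    PySem.Dict.get? (pvColsB vars) c
      = (PySem.List.index? vars c).map (fun k => pvColB vars.length k) := by
  have hps : pvColsB vars = PySem.Dict.update PySem.Dict.empty
      ((PySem.List.enumerate vars 0).map (fun pv => (pv.2, pvColB vars.length pv.1.toNat))) := by
    simp [pvColsB, PySem.Dict.update, List.foldl_map]
  have hkeys : (((PySem.List.enumerate vars 0).map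
      (fun pv => (pv.2, pvColB vars.length pv.1.toNat))).map Prod.fst).Nodup := by
    have h2 : (((PySem.List.enumerate vars 0).map
        (fun pv => (pv.2, pvColB vars.length pv.1.toNat))).map Prod.fst) = vars := by
      rw [List.map_map]
      exact PySem.List.map_snd_enumerate vars 0
    rw [h2]; exact hnd
  simp only [PySem.Dict.get?, hps, pvUpdate_empty _ hkeys]
  rw [show ((0 : Int)) = ((0 : Nat) : Int) by norm_num]
  rw [pvEnumFind vars c vars.length 0]
  cases PySem.List.index? vars c with
  | none => simp
  | some k => simp

-- ---- the column bitsets ----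

theorem pvColFold_testBit (b T : Nat) (j : Nat) :
    ((List.range T).foldl (fun col k => col ||| (((k >>> b) &&& 1) <<< k)) 0).testBit j
      = (decide (j < T) && j.testBit b) := by
  induction T with
  | zero => simp
  | succ T ih =>
    rw [List.range_succ, List.foldl_append, List.foldl_cons, List.foldl_nil]
    rw [Nat.testBit_or, ih, Nat.testBit_shiftLeft]
    have hx : (T >>> b) &&& 1 = if T.testBit b then 1 else 0 := by
      have h1 : (T >>> b) &&& 1 = (T >>> b) % 2 := by
        rw [Nat.and_comm]; exact Nat.one_and_eq_mod_two _
      have h2 : T.testBit b = (1 &&& T >>> b != 0) := rfl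
      rw [Nat.one_and_eq_mod_two] at h2
      rw [h1, h2]
      rcases Nat.mod_two_eq_zero_or_one (T >>> b) with h | h <;> simp [h]
    by_cases hj : j < T
    · have : ¬ (j ≥ T) := by omega
      simp [hj, this, show j < T + 1 by omega]
    · by_cases hjT : j = T
      · subst hjT
        have hge : j ≥ j := le_rfl
        simp only [hx, show ¬ (j < j) by omega, decide_false, Bool.false_and, Bool.false_or,
          hge, decide_true, Bool.true_and, Nat.sub_self, show j < j + 1 by omega]
        cases h : j.testBit b <;> simp
      · have h1 : ¬ (j < T + 1) := by omega
        by_cases hge : j ≥ T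
        · have hsub : j - T ≠ 0 := by omega
          simp only [hj, decide_false, Bool.false_and, Bool.false_or, hge, decide_true,
            Bool.true_and, h1]
          cases h : T.testBit b <;> simp [hx, h, Nat.testBit_eq_false_of_lt, hsub]
        · omega
  
theorem pvColB_testBit (n p j : Nat) (hj : j < 2 ^ n) :
    (pvColB n p).testBit j = j.testBit (n - 1 - p) := by
  unfold pvColB
  rw [PySem.List.pyRange_one]
  rw [List.foldl_map]
  have he : ((2 : Int) ^ n - 0).toNat = 2 ^ n := by
    rw [Int.sub_zero]
    rw [show ((2 : Int) ^ n) = ((2 ^ n : Nat) : Int) by push_cast; ring]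
    exact Int.toNat_natCast _
  rw [he]
  have : ∀ (col : Nat) (k : Nat),
      col ||| ((((0 + (k : Int)).toNat >>> (n - 1 - p)) &&& 1) <<< (0 + (k : Int)).toNat)
        = col ||| (((k >>> (n - 1 - p)) &&& 1) <<< k) := by
    intro col k; norm_num
  simp only [this]
  rw [pvColFold_testBit]
  simp [hj]

-- ---- binary digit strings: value, bound, and bit access ----

def pvVal (cs : List Char) : Nat := cs.foldl (fun a c => 2 * a + (if c = '1' then 1 else 0)) 0

theorem pvVal_foldl (cs : List Char) : ∀ (a : Nat),
    cs.foldl (fun a c => 2 * a + (if c = '1' then 1 else 0)) a = a * 2 ^ cs.length + pvVal cs := by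
  induction cs with
  | nil => intro a; simp [pvVal]
  | cons c t ih =>
    intro a
    have hval : pvVal (c :: t) = (if c = '1' then 1 else 0) * 2 ^ t.length + pvVal t := by
      unfold pvVal
      rw [List.foldl_cons, ih]
      simp [pvVal]
    rw [List.foldl_cons, ih, hval]
    rw [List.length_cons]
    ring

theorem pvVal_lt (cs : List Char) : pvVal cs < 2 ^ cs.length := by
  induction cs with
  | nil => simp [pvVal]
  | cons c t ih =>
    have hval : pvVal (c :: t) = (if c = '1' then 1 else 0) * 2 ^ t.length + pvVal t := by
      unfold pvVal
      rw [List.foldl_cons, pvVal_foldl]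
      simp [pvVal]
    rw [hval, List.length_cons]
    have : (if c = '1' then 1 else 0) ≤ 1 := by split <;> omega
    have h2 : (2 : Nat) ^ (t.length + 1) = 2 ^ t.length + 2 ^ t.length := by ring
    nlinarith

-- bits of b*2^m + r with r < 2^m: bit m is b, bits below m are r's
theorem pvTop_testBit (m : Nat) : ∀ (b r : Nat), b ≤ 1 → r < 2 ^ m →
    (b * 2 ^ m + r).testBit m = decide (b = 1) := by
  induction m with
  | zero =>
    intro b r hb hr
    interval_cases r
    interval_cases b <;> decide
  | succ m ih =>
    intro b r hb hr
    rw [Nat.testBit_succ]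
    have hdiv : (b * 2 ^ (m + 1) + r) / 2 = b * 2 ^ m + r / 2 := by
      have h3 : b * 2 ^ (m + 1) = 2 * (b * 2 ^ m) := by ring
      rw [h3]; omega
    rw [hdiv]
    exact ih b (r / 2) hb (by omega)

theorem pvLow_testBit (k : Nat) : ∀ (m b r : Nat), k < m →
    (b * 2 ^ m + r).testBit k = r.testBit k := by
  induction k with
  | zero =>
    intro m b r hk
    obtain ⟨m', rfl⟩ : ∃ m', m = m' + 1 := ⟨m - 1, by omega⟩
    rw [Nat.testBit_zero, Nat.testBit_zero]
    have h3 : b * 2 ^ (m' + 1) = 2 * (b * 2 ^ m') := by ring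
    rw [h3]
    simp only [decide_eq_decide]
    omega
  | succ k ih =>
    intro m b r hk
    obtain ⟨m', rfl⟩ : ∃ m', m = m' + 1 := ⟨m - 1, by omega⟩
    rw [Nat.testBit_succ, Nat.testBit_succ]
    have hdiv : (b * 2 ^ (m' + 1) + r) / 2 = b * 2 ^ m' + r / 2 := by
      have h3 : b * 2 ^ (m' + 1) = 2 * (b * 2 ^ m') := by ring
      rw [h3]; omega
    rw [hdiv]
    exact ih m' b (r / 2) (by omega)

theorem pvVal_testBit (cs : List Char) : ∀ (p : Nat), p < cs.length →
    (pvVal cs).testBit (cs.length - 1 - p) = decide (cs.getD p ' ' = '1') := by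
  induction cs with
  | nil => intro p hp; simp at hp
  | cons c t ih =>
    intro p hp
    have hval : pvVal (c :: t) = (if c = '1' then 1 else 0) * 2 ^ t.length + pvVal t := by
      unfold pvVal
      rw [List.foldl_cons, pvVal_foldl]
      simp [pvVal]
    rw [hval]
    cases p with
    | zero =>
      simp only [List.length_cons, Nat.add_sub_cancel, Nat.sub_zero, List.getD_cons_zero]
      rw [pvTop_testBit t.length _ _ (by split <;> omega) (pvVal_lt t)]
      split <;> simp_all
    | succ p =>
      have hp' : p < t.length := by simpa using hp
      have hidx : (c :: t).length - 1 - (p + 1) = t.length - 1 - p := by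
        simp; omega
      rw [hidx, List.getD_cons_succ]
      by_cases hplen : t.length - 1 - p < t.length
      · rw [pvLow_testBit _ _ _ _ hplen]
        exact ih p hp'
      · omega

-- ---- the mask string of index i: characters, length, reading its bits ----

theorem pvToDigits01 (j : Nat) : ∀ c ∈ Nat.toDigits 2 j, c = '0' ∨ c = '1' := by
  induction j using Nat.strong_induction_on with
  | _ j ih =>
    rw [Nat.toDigits_eq_if (by norm_num)]
    by_cases hj : j < 2
    · rw [if_pos hj]
      interval_cases j <;> simp [Nat.digitChar]
    · rw [if_neg hj]
      intro c hc
      rcases List.mem_append.mp hc with h | h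
      · exact ih (j / 2) (by omega) c h
      · have h2 : j % 2 < 2 := Nat.mod_lt _ (by norm_num)
        have := List.mem_singleton.mp h
        subst this
        interval_cases h : j % 2 <;> simp [Nat.digitChar]

theorem pvMask_len (n : Nat) (i : Int) (h0 : 0 ≤ i) (h1 : i < 2 ^ n) :
    n ≤ (PySem.Chars.zfill (PySem.Int.toBinChars i) (n : Int)).length ∧
    List.countP (fun c => c == '1') (PySem.Chars.zfill (PySem.Int.toBinChars i) (n : Int)) ≤ n := by
  have hlen := PySem.Chars.length_zfill (PySem.Int.toBinChars i) (n : Int)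
  rw [Int.toNat_natCast] at hlen
  constructor
  · omega
  · rcases Nat.eq_zero_or_pos n with hn | hn
    · subst hn
      have : i = 0 := by omega
      subst this
      decide
    · have hd : (PySem.Int.toBinChars i).length ≤ n := by
        unfold PySem.Int.toBinChars
        rw [if_neg (by omega)]
        apply Nat.toDigits_length 2 i.toNat n hn
        have : (i.toNat : Int) < ((2 : Nat) ^ n : Nat) := by
          push_cast; omega
        exact_mod_cast this
      calc List.countP _ _ ≤ (PySem.Chars.zfill (PySem.Int.toBinChars i) (n : Int)).length :=
            List.countP_le_length
        _ ≤ n := by omega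

theorem pvMaskA_eq (n : Nat) (i : Int) (h0 : 0 ≤ i) :
    PySem.Chars.zfill (PySem.List.slice (PySem.Int.toBinChars0b i) (some 2) none) (n : Int) =
      PySem.Chars.zfill (PySem.Int.toBinChars i) (n : Int) := by
  have harg : PySem.List.slice (PySem.Int.toBinChars0b i) (some 2) none
      = PySem.Int.toBinChars i := by
    rw [PySem.List.slice_some_none]
    unfold PySem.Int.toBinChars PySem.Int.toBinChars0b
    rw [if_neg (by omega), if_neg (by omega)]
    simp [PySem.List.clampIdx]
  rw [harg]

theorem pvVal_toDigits (j : Nat) : pvVal (Nat.toDigits 2 j) = j := by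
  induction j using Nat.strong_induction_on with
  | _ j ih =>
    rw [Nat.toDigits_eq_if (by norm_num)]
    by_cases hj : j < 2
    · rw [if_pos hj]
      interval_cases j <;> decide
    · rw [if_neg hj]
      unfold pvVal
      rw [List.foldl_append, List.foldl_cons, List.foldl_nil]
      rw [show (Nat.toDigits 2 (j / 2)).foldl (fun a c => 2 * a + (if c = '1' then 1 else 0)) 0
            = pvVal (Nat.toDigits 2 (j / 2)) from rfl]
      rw [ih (j / 2) (by omega)]
      have h2 : j % 2 < 2 := Nat.mod_lt _ (by norm_num)
      interval_cases h : j % 2 <;> simp [Nat.digitChar] <;> omega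

theorem pvVal_pad (k : Nat) (cs : List Char) :
    pvVal (List.replicate k '0' ++ cs) = pvVal cs := by
  induction k with
  | zero => simp
  | succ k ih =>
    rw [List.replicate_succ, List.cons_append]
    unfold pvVal
    rw [List.foldl_cons]
    simpa [pvVal] using ih

theorem pvZfill_pad (cs : List Char) (n : Nat) (hlen : cs.length ≤ n)
    (h01 : ∀ c ∈ cs, c = '0' ∨ c = '1') :
    PySem.Chars.zfill cs (n : Int) = List.replicate (n - cs.length) '0' ++ cs := by
  unfold PySem.Chars.zfill
  by_cases hw : (n : Int) ≤ (cs.length : Int)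
  · rw [if_pos hw]
    have : n = cs.length := by omega
    simp [this]
  · rw [if_neg hw]
    cases cs with
    | nil => simp
    | cons c0 rest =>
      have hc0 := h01 c0 (List.mem_cons_self ..)
      dsimp only
      rw [if_neg (by rcases hc0 with h' | h' <;> simp [h'])]
      simp

-- the p-th character of format(i,'b').zfill(n) is bit (n-1-p) of i
theorem pvMask_getD (n p : Nat) (iN : Nat) (hp : p < n) (hi : iN < 2 ^ n) :
    (PySem.Chars.zfill (PySem.Int.toBinChars (iN : Int)) (n : Int)).getD p ' '
      = if iN.testBit (n - 1 - p) then '1' else '0' := by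
  have hn : 0 < n := by omega
  have hdig : PySem.Int.toBinChars (iN : Int) = Nat.toDigits 2 iN := by
    unfold PySem.Int.toBinChars
    rw [if_neg (by omega)]
    simp
  have hdlen : (Nat.toDigits 2 iN).length ≤ n := by
    apply Nat.toDigits_length 2 iN n hn
    exact_mod_cast hi
  rw [hdig, pvZfill_pad _ _ hdlen (pvToDigits01 iN)]
  set mask := List.replicate (n - (Nat.toDigits 2 iN).length) '0' ++ Nat.toDigits 2 iN with hm
  have hmlen : mask.length = n := by simp [hm]; omega
  have hval : pvVal mask = iN := by rw [hm, pvVal_pad, pvVal_toDigits]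
  have := pvVal_testBit mask p (by omega)
  rw [hmlen, hval] at this
  have h01 : mask.getD p ' ' = '0' ∨ mask.getD p ' ' = '1' := by
    have hmem : mask.getD p ' ' ∈ mask := by
      rw [List.getD_eq_getElem?_getD, List.getElem?_eq_getElem (by omega)]
      exact List.getElem_mem _
    have : ∀ c ∈ mask, c = '0' ∨ c = '1' := by
      intro c hc
      rw [hm] at hc
      rcases List.mem_append.mp hc with h' | h'
      · left; exact List.eq_of_mem_replicate h'
      · exact pvToDigits01 iN c h'
    exact this _ hmem
  rcases h01 with h' | h' <;> rw [h'] at this ⊢ <;> simp at this <;> simp [this]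

-- m.count('1') is the count of '1' characters
theorem pvCountGo1 (fuel : Nat) : ∀ (cs : List Char) (acc : Nat), cs.length ≤ fuel →
    PySem.Chars.count.go ['1'] fuel cs acc = acc + cs.countP (· == '1') := by
  induction fuel with
  | zero =>
    intro cs acc h
    cases cs with
    | nil => simp [PySem.Chars.count.go]
    | cons c t => simp at h
  | succ f ih =>
    intro cs acc h
    cases cs with
    | nil => simp [PySem.Chars.count.go]
    | cons c t =>
      by_cases hc : c = '1'
      · simp [PySem.Chars.count.go, hc, List.isPrefixOf, ih t (acc + 1) (by simpa using h)]
        omega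
      · simp [PySem.Chars.count.go, List.isPrefixOf, hc, ih t acc (by simpa using h)]
        intro h'
        exact absurd h'.symm hc

theorem pvCount_one (cs : List Char) : PySem.Chars.count cs ['1'] = cs.countP (· == '1') := by
  simp [PySem.Chars.count, pvCountGo1 cs.length cs 0 le_rfl]

-- ---- one character: A's substituted step = bit i of B's symbolic step ----

theorem pvStepA_none (f : Char → Char) (cs : List Char) :
    cs.foldl (fun o c => pvStepA o (f c)) none = none := by
  induction cs <;> simp_all [pvStepA]

theorem pvStepB_none (cols : PySem.Dict Char Nat) (full : Nat) (cs : List Char) :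
    cs.foldl (pvStepB cols full) none = none := by
  induction cs <;> simp_all [pvStepB]

theorem pvStep_corr (w : List Char) (iN : Nat) (mask : List Char)
    (hi : iN < 2 ^ (pvVarsA w).length)
    (hlen : (pvVarsA w).length ≤ mask.length)
    (hbits : ∀ p < (pvVarsA w).length, mask.getD p ' '
        = if iN.testBit ((pvVarsA w).length - 1 - p) then '1' else '0')
    (c : Char) (sb : List Nat) :
    pvStepA (some (sb.map (pvBit iN))) (pvSub2A (pvSub1A (pvVarsA w) mask c)) =
      Option.map (List.map (pvBit iN))
        (pvStepB (pvColsB (pvVarsA w)) (2 ^ 2 ^ (pvVarsA w).length - 1) (some sb) c) := by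
  set vars := pvVarsA w with hv
  set n := vars.length with hn
  set full := 2 ^ 2 ^ n - 1 with hf
  have hfull : ∀ j < 2 ^ n, full.testBit j = true := by
    intro j hj
    rw [hf, Nat.testBit_two_pow_sub_one]
    simpa using hj
  rw [show pvStepB (pvColsB vars) full (some sb) c
      = (match PySem.Dict.get? (pvColsB vars) c with
    | some col => some (col :: sb)
    | none =>
      if c ∈ (['1', 'T'] : List Char) then some (full :: sb)
      else if c ∈ (['0', 'F'] : List Char) then some ((0 : Nat) :: sb)
      else if c ∈ (['^', '&', '|', '/', '>'] : List Char) then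
        match sb with
        | x :: y :: rest => some (pvOpB full c x y :: rest)
        | _ => none
      else if c = '~' then
        match sb with
        | x :: rest => some ((full ^^^ x) :: rest)
        | [] => none
      else some sb) from rfl]
  rw [pvColsB_get? vars c (pvVarsA_nodup w)]
  by_cases hc : c ∈ vars
  · -- a variable: A pushes the mask bit, B pushes the column
    obtain ⟨k, hk⟩ : ∃ k, PySem.List.index? vars c = some k := by
      cases h : PySem.List.index? vars c with
      | none => exact absurd ((PySem.List.index?_eq_none_iff vars c).mp h) (by simp [hc])
      | some k => exact ⟨k, rfl⟩
    have hklt : k < n := pvIndex?_lt vars c k hk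
    have hsub : pvSub1A vars mask c = mask.getD k ' ' := by
      unfold pvSub1A
      rw [pvFind_single, hk]
      rw [if_pos (by positivity)]
      rw [PySem.List.pyGetD_natCast]
      rw [List.getD_eq_getElem?_getD, List.getD_eq_getElem?_getD,
        List.getElem?_eq_getElem (by omega)]
      simp
    rw [hk]
    simp only [Option.map_some]
    have hcol := pvColB_testBit n k iN hi
    rw [hsub, hbits k hklt]
    cases hb : iN.testBit (n - 1 - k) <;>
      simp [pvSub2A, pvStepA, pvBit] <;>
      exact hcol.trans hb
  · have hnone : PySem.List.index? vars c = none := (PySem.List.index?_eq_none_iff vars c).mpr hc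
    rw [hnone]
    have hsub : pvSub1A vars mask c = c := by
      unfold pvSub1A
      rw [pvFind_single, hnone]
      norm_num
    rw [hsub]
    simp only [Option.map_none]
    have hfT : full.testBit iN = true := hfull iN hi
    by_cases hT : c = 'T'
    · subst hT; simp [pvSub2A, pvStepA, pvBit, hfT]
    by_cases hF : c = 'F'
    · subst hF; simp [pvSub2A, pvStepA, pvBit]
    have hsub2 : pvSub2A c = c := by simp [pvSub2A, hT, hF]
    rw [hsub2]
    by_cases h0 : c = '0'
    · subst h0; simp [pvStepA, pvBit]
    by_cases h1 : c = '1'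
    · subst h1; simp [pvStepA, pvBit, hfT]
    by_cases hop : c ∈ (['^', '&', '|', '/', '>'] : List Char)
    · have hn01 : c ∉ (['0', '1'] : List Char) := by simp [h0, h1]
      have hn1T : c ∉ (['1', 'T'] : List Char) := by simp [h1, hT]
      have hn0F : c ∉ (['0', 'F'] : List Char) := by simp [h0, hF]
      cases sb with
      | nil => simp [pvStepA, hn01, hn1T, hn0F, hop]
      | cons x rest =>
        cases rest with
        | nil => simp [pvStepA, hn01, hn1T, hn0F, hop]
        | cons y rest2 =>
          simp only [List.map_cons, pvStepA, if_neg hn01, if_pos hop, if_neg hn1T,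
            if_neg hn0F, Option.map_some]
          congr 1
          have hxor := Nat.testBit_xor x y iN
          have hand := Nat.testBit_and x y iN
          have hor := Nat.testBit_or x y iN
          fin_cases hop <;>
            cases hx : x.testBit iN <;> cases hy : y.testBit iN <;>
              simp [pvApplyA, pvOpB, pvBit, Nat.testBit_xor, Nat.testBit_and, Nat.testBit_or,
                hx, hy, hfT]
    by_cases htl : c = '~'
    · subst htl
      cases sb with
      | nil => simp [pvStepA]
      | cons x rest =>
        cases hx : x.testBit iN <;>
          simp [pvStepA, pvBit, Nat.testBit_xor, hx, hfT]
    · have hn01 : c ∉ (['0', '1'] : List Char) := by simp [h0, h1]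
      have hn1T : c ∉ (['1', 'T'] : List Char) := by simp [h1, hT]
      have hn0F : c ∉ (['0', 'F'] : List Char) := by simp [h0, hF]
      simp [pvStepA, hn01, hn1T, hn0F, hop, htl]

theorem pvFold_corr (w cs : List Char) (iN : Nat) (mask : List Char)
    (hi : iN < 2 ^ (pvVarsA w).length)
    (hlen : (pvVarsA w).length ≤ mask.length)
    (hbits : ∀ p < (pvVarsA w).length, mask.getD p ' '
        = if iN.testBit ((pvVarsA w).length - 1 - p) then '1' else '0')
    (sb : List Nat) :
    cs.foldl (fun o c => pvStepA o (pvSub2A (pvSub1A (pvVarsA w) mask c)))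
        (some (sb.map (pvBit iN))) =
      Option.map (List.map (pvBit iN))
        (cs.foldl (pvStepB (pvColsB (pvVarsA w)) (2 ^ 2 ^ (pvVarsA w).length - 1)) (some sb)) := by
  induction cs generalizing sb with
  | nil => simp
  | cons c cs ih =>
    simp only [List.foldl_cons]
    rw [pvStep_corr w iN mask hi hlen hbits c sb]
    cases h : pvStepB (pvColsB (pvVarsA w)) (2 ^ 2 ^ (pvVarsA w).length - 1) (some sb) c with
    | none => simp [pvStepA_none, pvStepB_none]
    | some st' => simpa using ih st'

-- evaluate(exp, mask_i) is bit i of B's single symbolic pass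
theorem pvEval_corr (w : List Char) (iN : Nat) (mask : List Char)
    (hi : iN < 2 ^ (pvVarsA w).length)
    (hlen : (pvVarsA w).length ≤ mask.length)
    (hbits : ∀ p < (pvVarsA w).length, mask.getD p ' '
        = if iN.testBit ((pvVarsA w).length - 1 - p) then '1' else '0') :
    pvEvalA w mask = Option.map (pvBit iN)
      ((w.foldl (pvStepB (pvColsB (pvVarsA w)) (2 ^ 2 ^ (pvVarsA w).length - 1))
          (some [])).bind List.getLast?) := by
  unfold pvEvalA
  dsimp only
  rw [List.foldl_map, List.foldl_map]
  rw [show (some [] : Option (List Int)) = some (List.map (pvBit iN) []) from rfl]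
  rw [pvFold_corr w w iN mask hi hlen hbits []]
  cases w.foldl (pvStepB (pvColsB (pvVarsA w)) (2 ^ 2 ^ (pvVarsA w).length - 1)) (some []) with
  | none => simp
  | some st => simp [List.getLast?_map]

-- ---- a stable sort by a bounded key is the concatenation of its buckets ----

theorem pvInsertBy_append {α : Type} (before : α → α → Bool) (x : α) (ys zs : List α)
    (h : ∀ y ∈ ys, before x y = false) :
    PySem.List.insertBy before x (ys ++ zs) = ys ++ PySem.List.insertBy before x zs := by
  induction ys with
  | nil => simp
  | cons y ys ih =>
    simp only [List.cons_append, PySem.List.insertBy, h y (by simp), Bool.false_eq_true,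
      if_false]
    rw [ih (fun a ha => h a (by simp [ha]))]

theorem pvInsertBy_front {α : Type} (before : α → α → Bool) (x : α) (zs : List α)
    (h : ∀ y ∈ zs, before x y = true) :
    PySem.List.insertBy before x zs = x :: zs := by
  cases zs with
  | nil => rfl
  | cons z zs => simp [PySem.List.insertBy, h z (by simp)]

theorem pvSorted_buckets {α : Type} (xs : List α) (key : α → Int) (N : Nat)
    (h : ∀ x ∈ xs, 0 ≤ key x ∧ key x ≤ N) :
    PySem.List.sorted xs key false =
      (List.range (N + 1)).flatMap
        (fun (k : Nat) => xs.filter (fun x => decide (key x = (k : Int)))) := by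
  induction xs using List.reverseRecOn with
  | nil => simp [PySem.List.sorted_eq_foldl_insertBy]
  | append_singleton xs x ih =>
    have hx := h x (by simp)
    have hxs : ∀ y ∈ xs, 0 ≤ key y ∧ key y ≤ N := fun y hy => h y (by simp [hy])
    rw [PySem.List.sorted_eq_foldl_insertBy, List.foldl_append, List.foldl_cons, List.foldl_nil,
      ← PySem.List.sorted_eq_foldl_insertBy, ih hxs]
    set kx := (key x).toNat with hkx
    have hkx' : key x = (kx : Int) := by omega
    have hkxN : kx ≤ N := by omega
    have hsplit : List.range (N + 1)
        = List.range (kx + 1) ++ (List.range (N - kx)).map (fun j => (kx + 1) + j) := by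
      rw [← List.range_add]; congr 1; omega
    rw [hsplit, List.flatMap_append, List.flatMap_append]
    have hL : ∀ y ∈ (List.range (kx + 1)).flatMap
        (fun (k : Nat) => xs.filter (fun z => decide (key z = (k : Int)))),
        (decide (key x < key y)) = false := by
      intro y hy
      obtain ⟨k, hk, hyk⟩ := List.mem_flatMap.mp hy
      have hk1 : k < kx + 1 := List.mem_range.mp hk
      have hky := (List.mem_filter.mp hyk).2
      simp only [decide_eq_true_eq] at hky
      simp only [decide_eq_false_iff_not, not_lt, hky, hkx']
      exact_mod_cast Nat.le_of_lt_succ hk1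
    have hR : ∀ y ∈ ((List.range (N - kx)).map (fun j => (kx + 1) + j)).flatMap
        (fun (k : Nat) => xs.filter (fun z => decide (key z = (k : Int)))),
        (decide (key x < key y)) = true := by
      intro y hy
      obtain ⟨k, hk, hyk⟩ := List.mem_flatMap.mp hy
      obtain ⟨j, hj, rfl⟩ := List.mem_map.mp hk
      have hky := (List.mem_filter.mp hyk).2
      simp only [decide_eq_true_eq] at hky
      simp only [decide_eq_true_eq, hky, hkx']
      push_cast; omega
    rw [pvInsertBy_append _ _ _ _ hL, pvInsertBy_front _ _ _ hR]
    have hfother : ∀ (k : Nat), k ≠ kx → (xs ++ [x]).filter (fun z => decide (key z = (k : Int)))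
        = xs.filter (fun z => decide (key z = (k : Int))) := by
      intro k hkk
      rw [List.filter_append]
      have : (decide (key x = (k : Int))) = false := by
        simp only [decide_eq_false_iff_not, hkx']
        exact_mod_cast fun he => hkk (by exact_mod_cast he.symm)
      simp [this]
    have hfx : (xs ++ [x]).filter (fun z => decide (key z = (kx : Int)))
        = xs.filter (fun z => decide (key z = (kx : Int))) ++ [x] := by
      rw [List.filter_append]
      simp [hkx']
    have hrng : List.range (kx + 1) = List.range kx ++ [kx] := List.range_succ
    rw [hrng, List.flatMap_append, List.flatMap_append]
    have e1 : (List.range kx).flatMap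
          (fun (k : Nat) => (xs ++ [x]).filter (fun z => decide (key z = (k : Int))))
        = (List.range kx).flatMap
          (fun (k : Nat) => xs.filter (fun z => decide (key z = (k : Int)))) := by
      apply List.flatMap_congr
      intro k hk
      exact hfother k (by have := List.mem_range.mp hk; omega)
    have e2 : ((List.range (N - kx)).map (fun j => (kx + 1) + j)).flatMap
          (fun (k : Nat) => (xs ++ [x]).filter (fun z => decide (key z = (k : Int))))
        = ((List.range (N - kx)).map (fun j => (kx + 1) + j)).flatMap
          (fun (k : Nat) => xs.filter (fun z => decide (key z = (k : Int)))) := by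
      apply List.flatMap_congr
      intro k hk
      obtain ⟨j, hj, rfl⟩ := List.mem_map.mp hk
      exact hfother _ (by omega)
    rw [e1, e2]
    simp only [List.flatMap_singleton, hfx]
    simp [List.append_assoc]

-- ---- B's bucket loop fills exactly those buckets ----

theorem pvBuckets {α : Type} (M : Int → α) (P : Int → Prop) [DecidablePred P] (K : Int → Nat)
    (l : List Int) (bs : List (List α)) (hK : ∀ i ∈ l, K i < bs.length) :
    l.foldl (fun bs i => if P i then bs.set (K i) (bs.getD (K i) [] ++ [M i]) else bs) bs =
      (List.range bs.length).map
        (fun k => bs.getD k [] ++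
          ((l.filter (fun i => decide (P i) && (K i == k))).map M)) := by
  induction l generalizing bs with
  | nil =>
    simp only [List.foldl_nil, List.filter_nil, List.map_nil, List.append_nil]
    apply List.ext_getElem (by simp)
    intro k h1 h2
    simp [List.getD_eq_getElem?_getD, List.getElem?_eq_getElem (by simpa using h2)]
  | cons i l ih =>
    simp only [List.foldl_cons]
    by_cases hp : P i
    · rw [if_pos hp]
      rw [ih _ (by intro j hj; rw [List.length_set]; exact hK j (by simp [hj]))]
      rw [List.length_set]
      apply List.map_congr_left
      intro k hk
      have hklt : k < bs.length := List.mem_range.mp hk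
      by_cases hik : K i = k
      · subst hik
        rw [List.getD_eq_getElem?_getD, List.getElem?_eq_getElem (by simpa using hklt)]
        rw [List.getElem_set, if_pos rfl]
        rw [List.filter_cons, List.getD_eq_getElem?_getD,
          List.getElem?_eq_getElem hklt]
        simp [hp, List.append_assoc]
      · rw [List.getD_eq_getElem?_getD, List.getElem?_eq_getElem (by simpa using hklt)]
        rw [List.getElem_set, if_neg hik]
        rw [List.filter_cons]
        have : (decide (P i) && (K i == k)) = false := by simp [hik]
        rw [this]
        simp only [Bool.false_eq_true, if_false]
        simp [List.getD_eq_getElem?_getD, List.getElem?_eq_getElem hklt]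
    · rw [if_neg hp]
      rw [ih _ (by intro j hj; exact hK j (by simp [hj]))]
      apply List.map_congr_left
      intro k hk
      rw [List.filter_cons]
      have : (decide (P i) && (K i == k)) = false := by simp [hp]
      rw [this]
      simp

-- ---- keys: ones(mask) is the 0/1-count ----

theorem pvOnes_eq (s : List Char) : pvOnesA s = (s.countP (fun c => c == '1') : Int) := by
  unfold pvOnesA
  have := PySem.List.foldl_count_if (fun c : Char => c == '1') s 0
  simpa using this

-- ---- assembly ----

set_option maxHeartbeats 2000000 in
theorem pvMain (exp : String) : makeTruthTable exp = makeTruthTable_alt exp := by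
  unfold makeTruthTable makeTruthTable_alt
  rw [← pvVars_eq]
  dsimp only
  set w := exp.toList with hw
  set n := (pvVarsA w).length with hn
  set l := PySem.List.pyRange 0 ((2 : Int) ^ n) 1 with hl
  have hmem : ∀ i ∈ l, 0 ≤ i ∧ i < (2 : Int) ^ n := by
    intro i hi
    rw [hl] at hi
    have := PySem.List.mem_pyRange_one.mp hi
    exact ⟨this.1, this.2⟩
  have hiN : ∀ i ∈ l, i.toNat < 2 ^ n := by
    intro i hi
    have := hmem i hi
    have h2 : ((2 : Int) ^ n) = ((2 ^ n : Nat) : Int) := by push_cast; ring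
    omega
  -- A's masks are B's masks
  have hmasks : l.map (fun i =>
        PySem.Chars.zfill (PySem.List.slice (PySem.Int.toBinChars0b i) (some 2) none) (n : Int))
      = l.map (fun i => PySem.Chars.zfill (PySem.Int.toBinChars i) (n : Int)) :=
    List.map_congr_left (fun i hi => pvMaskA_eq n i (hmem i hi).1)
  rw [hmasks]
  -- shorthand for the mask of index i and for evaluate's result on it
  set maskOf := fun (i : Int) => PySem.Chars.zfill (PySem.Int.toBinChars i) (n : Int) with hmf
  -- facts about every mask in the list
  have hmlen : ∀ i ∈ l, n ≤ (maskOf i).length := fun i hi =>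
    (pvMask_len n i (hmem i hi).1 (hmem i hi).2).1
  have hbits : ∀ i ∈ l, ∀ p < n, (maskOf i).getD p ' '
      = if i.toNat.testBit (n - 1 - p) then '1' else '0' := by
    intro i hi p hp
    have h0 := (hmem i hi).1
    have : ((i.toNat : Nat) : Int) = i := Int.toNat_of_nonneg h0
    rw [hmf]
    rw [show i = ((i.toNat : Nat) : Int) from this.symm]
    exact pvMask_getD n p i.toNat hp (hiN i hi)
  -- evaluate(exp, mask_i) = bit i of the symbolic pass
  have heval : ∀ i ∈ l, pvEvalA w (maskOf i) = Option.map (pvBit i.toNat)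
      ((w.foldl (pvStepB (pvColsB (pvVarsA w)) (2 ^ 2 ^ n - 1)) (some [])).bind List.getLast?) := by
    intro i hi
    exact pvEval_corr w i.toNat (maskOf i) (hiN i hi) (hmlen i hi) (hbits i hi)
  -- the key is bounded by n on every mask
  have hbound : ∀ m ∈ l.map maskOf, 0 ≤ pvOnesA m ∧ pvOnesA m ≤ (n : Int) := by
    intro m hm
    obtain ⟨i, hi, rfl⟩ := List.mem_map.mp hm
    rw [pvOnes_eq]
    have := (pvMask_len n i (hmem i hi).1 (hmem i hi).2).2
    constructor
    · positivity
    · exact_mod_cast this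
  -- A's side: sort = popcount buckets, filter pushed inside
  rw [pvSorted_buckets _ pvOnesA n hbound]
  rw [PySem.List.foldl_append_ite_eq_filter (fun m => pvEvalA w m = some 1)]
  rw [List.nil_append, List.filter_flatMap]
  -- B's side
  cases hS : (w.foldl (pvStepB (pvColsB (pvVarsA w)) (2 ^ 2 ^ n - 1)) (some [])).bind
      List.getLast? with
  | none =>
    -- Python would raise here (outside Pre_); A's filters are all empty too
    have hempty : ∀ k ∈ List.range (n + 1),
        ((l.map maskOf).filter (fun x => decide (pvOnesA x = (k : Int)))).filter
          (fun m => pvEvalA w m = some 1) = [] := by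
      intro k _
      rw [List.filter_eq_nil_iff]
      intro m hm
      have hm' := (List.mem_filter.mp hm).1
      obtain ⟨i, hi, rfl⟩ := List.mem_map.mp hm'
      rw [heval i hi, hS]
      simp
    rw [List.flatMap_congr hempty]
    simp
  | some S =>
    -- B's loop: normalize the bucket index, then apply the bucket-loop lemma
    simp only [pvCount_one, PySem.List.pySetD_natCast, PySem.List.pyGetD_natCast]
    rw [pvBuckets maskOf
      (fun i => (S >>> i.toNat) &&& 1 ≠ 0)
      (fun i => List.countP (fun ch => ch == '1') (maskOf i))
      l (List.replicate (n + 1) [])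
      (by
        intro i hi
        have h2 := (pvMask_len n i (hmem i hi).1 (hmem i hi).2).2
        simpa using Nat.lt_succ_of_le h2)]
    rw [List.length_replicate]
    rw [PySem.List.foldl_append_eq_flatMap (fun b => b)]
    rw [List.nil_append, List.flatMap_map]
    congr 1
    apply List.flatMap_congr
    intro k hk
    rw [List.getD_replicate _ (List.mem_range.mp hk), List.nil_append]
    rw [List.filter_filter, List.filter_map]
    congr 1
    apply List.filter_congr
    intro i hi
    simp only [Function.comp]
    have he : (pvEvalA w (maskOf i) = some 1) ↔ ((S >>> i.toNat) &&& 1 ≠ 0) := by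
      rw [heval i hi, hS]
      have htb : S.testBit i.toNat = ((S >>> i.toNat) &&& 1 != 0) := by
        rw [show S.testBit i.toNat = (1 &&& S >>> i.toNat != 0) from rfl, Nat.and_comm]
      simp only [Option.map_some, Option.some.injEq, pvBit]
      constructor
      · intro h
        by_cases hb : S.testBit i.toNat
        · rw [htb] at hb; simpa using hb
        · rw [if_neg hb] at h; exact absurd h (by norm_num)
      · intro h
        have hb : S.testBit i.toNat = true := by rw [htb]; simpa using h
        rw [if_pos hb]
    have e1 : (decide (pvEvalA w (maskOf i) = some 1))
        = (decide ((S >>> i.toNat) &&& 1 ≠ 0)) := decide_eq_decide.mpr he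
    have e2 : (decide (pvOnesA (maskOf i) = (k : Int)))
        = (List.countP (fun ch => ch == '1') (maskOf i) == k) := by
      rw [pvOnes_eq]
      simp only [Nat.cast_inj]
      exact (Bool.beq_eq_decide_eq _ _).symm
    rw [e1, e2]

-- ===== VERDICT (by name: the statement is the Claim_ definition above) =====
theorem makeTruthTable_spec : Claim_equal_makeTruthTable := by
  intro exp _ _
  exact pvMain exp
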